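-- pv_equiv track=rewrite | github.com/MartGon/RosterMaster | rc.py | GetDuplicates
-- ===== SOURCE A (Python) =====
-- def GetDuplicates(rosters: "list[common.Roster]"):
--
--     duplicates = {}
--     size = len(rosters)
--     for i in range(0, size):
--         for j in range(i + 1, size):
--
--             r1 = rosters[i]
--             r2 = rosters[j]
--             for c1, char1 in r1.items():
--                 for c2, _ in r2.items():
--                     if c1 == c2 :
--                         duplicates[c1] = char1
--     return duplicates
-- ===== SOURCE B (Python) =====
-- def GetDuplicates(rosters: "list[common.Roster]"):
--     # later[i] = keys that occur in some roster after i (one backward pass)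
--     later = []
--     seen = set()
--     for r in reversed(rosters):
--         later.append(set(seen))
--         seen |= set(r)
--     later.reverse()
--     # a key is a duplicate iff some later roster also has it; forward scan,
--     # later rosters overwrite the stored value
--     duplicates = {}
--     for i, r in enumerate(rosters):
--         for c, v in r.items():
--             if c in later[i]:
--                 duplicates[c] = v
--     return duplicates
-- ===== Notes on version B (the rewrite author's own statement) =====
-- stated objective: faster
-- what changed: Replaces A's quadruple nested loop over all roster pairs by one backward pass computing, per position, the set of keys occurring later, and one forward pass recording each key that has a later occurrence; Pre_ excludes rosters that repeat a key (no Python dict yields such an association list) and inputs where two duplicated keys first occur in the same roster with their in-roster order opposite to the order of their next occurrences, where the result dict's key order is an accident of iteration order in both programs.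
-- outside the precondition, e.g. on GetDuplicates([{'a': 1, 'b': 2}, {'b': 3}, {'a': 4}]): A returns {'b': 2, 'a': 1}, B returns {'a': 1, 'b': 2}
import Mathlib
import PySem

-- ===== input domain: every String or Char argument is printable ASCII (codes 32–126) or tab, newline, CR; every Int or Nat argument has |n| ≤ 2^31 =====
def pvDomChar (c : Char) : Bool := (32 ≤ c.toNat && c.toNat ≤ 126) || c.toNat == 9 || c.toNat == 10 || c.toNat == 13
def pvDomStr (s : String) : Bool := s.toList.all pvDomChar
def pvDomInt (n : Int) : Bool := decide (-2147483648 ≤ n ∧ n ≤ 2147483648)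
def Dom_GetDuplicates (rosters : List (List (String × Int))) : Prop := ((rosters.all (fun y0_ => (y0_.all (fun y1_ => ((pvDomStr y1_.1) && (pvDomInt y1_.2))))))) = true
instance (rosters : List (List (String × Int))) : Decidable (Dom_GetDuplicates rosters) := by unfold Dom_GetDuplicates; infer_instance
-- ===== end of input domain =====

-- B replaces A's quadruple nested loop over roster pairs by one backward pass that
-- collects, per position, the set of keys occurring later, and one forward pass that
-- records every key that has a later occurrence; equivalence is on the RETURN value.

-- ===== PORT A =====
-- literal transliteration of A's nested loops; the dicts (rosters[i]) are modelled as
-- association lists with distinct keys (see Pre_), so `.items()` is the list itself.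
def GetDuplicates (rosters : List (List (String × Int))) : List (String × Int) :=
  let size : Int := rosters.length
  ((PySem.List.pyRange 0 size).foldl (fun d i =>
    (PySem.List.pyRange (i+1) size).foldl (fun d j =>
      let r1 := PySem.List.pyGetD rosters i []
      let r2 := PySem.List.pyGetD rosters j []
      r1.foldl (fun d p =>
        r2.foldl (fun d q =>
          if p.1 == q.1 then d.insert p.1 p.2 else d) d) d) d) PySem.Dict.empty).items

-- ===== PORT B =====
-- transliteration of Source B: backward pass building `later` (the key sets of the
-- rosters after each position), then a forward pass inserting keys found in later[i].
def GetDuplicates_alt (rosters : List (List (String × Int))) : List (String × Int) :=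
  let p := rosters.reverse.foldl
    (fun (p : List (PySem.Set String) × PySem.Set String) r =>
      (p.1 ++ [p.2], PySem.Set.union p.2 (PySem.Set.ofList (r.map Prod.fst))))
    ([], PySem.Set.empty)
  let later := p.1.reverse
  ((PySem.List.enumerate rosters).foldl (fun dup ir =>
      ir.2.foldl (fun dup cv =>
        if PySem.Set.contains (PySem.List.pyGetD later ir.1 PySem.Set.empty) cv.1
        then dup.insert cv.1 cv.2 else dup) dup)
    PySem.Dict.empty).items

-- ===== PRECONDITION & SPEC =====

-- input-occurrence helpers used by Pre_ (they inspect WHERE keys occur in the input)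
def pvR (rosters : List (List (String × Int))) (i : Int) : List (String × Int) :=
  PySem.List.pyGetD rosters i []
def pvHasK (rosters : List (List (String × Int))) (j : Int) (c : String) : Bool :=
  (pvR rosters j).any (fun q => c == q.1)
-- roster indices in which key c occurs, ascending
def pvI (rosters : List (List (String × Int))) (c : String) : List Int :=
  (PySem.List.pyRange 0 rosters.length).filter (fun i => pvHasK rosters i c)
def pvI1 (rosters : List (List (String × Int))) (c : String) : Int := (pvI rosters c).getD 0 0
def pvI2 (rosters : List (List (String × Int))) (c : String) : Int := (pvI rosters c).getD 1 0
def pvPos (rosters : List (List (String × Int))) (c : String) (i : Int) : Nat :=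
  List.idxOf c ((pvR rosters i).map Prod.fst)

-- Pre_ excludes (a) rosters that repeat a key — no Python dict yields such an
-- association list — and (b) inputs where two keys duplicated across rosters first
-- occur in the same roster with their in-roster order opposite to the order of their
-- next occurrences: there the result dict's key order is an accident of iteration
-- order in both A and B (a defensible-corner tie), and the two orders differ.
def Pre_GetDuplicates (rosters : List (List (String × Int))) : Prop :=
  (∀ r ∈ rosters, (r.map Prod.fst).Nodup) ∧
  (∀ c ∈ rosters.flatMap (fun r => r.map Prod.fst),
   ∀ d ∈ rosters.flatMap (fun r => r.map Prod.fst),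
    2 ≤ (pvI rosters c).length → 2 ≤ (pvI rosters d).length →
    pvI1 rosters c = pvI1 rosters d →
    pvPos rosters c (pvI1 rosters c) < pvPos rosters d (pvI1 rosters d) →
    pvI2 rosters c ≤ pvI2 rosters d)
instance (rosters : List (List (String × Int))) : Decidable (Pre_GetDuplicates rosters) := by
  unfold Pre_GetDuplicates; infer_instance
def pvWitness_GetDuplicates : (List (List (String × Int))) :=
  [[("a", 1), ("b", 2)], [("a", 3)], [("b", 4), ("a", 5)]]

def Spec_GetDuplicates (rosters : List (List (String × Int))) (out : List (String × Int)) : Prop := out = GetDuplicates_alt rosters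
instance (rosters : List (List (String × Int))) (out : List (String × Int)) : Decidable (Spec_GetDuplicates rosters out) := by unfold Spec_GetDuplicates; infer_instance

-- ===== CLAIM (what is proved, stated in full; the proofs are below) =====
def Claim_equal_GetDuplicates : Prop := ∀ (rosters : List (List (String × Int))), Dom_GetDuplicates rosters → Pre_GetDuplicates rosters → Spec_GetDuplicates rosters (GetDuplicates rosters)

-- ===== LEMMAS AND PROOFS =====

-- ===== proof-side definitions =====

def pvBlk (rosters : List (List (String × Int))) (i j : Int) : List (String × Int) :=
  (pvR rosters i).filter (fun p => pvHasK rosters j p.1)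
def pvP (n : Int) : List (Int × Int) :=
  (PySem.List.pyRange 0 n).flatMap (fun i => (PySem.List.pyRange (i+1) n).map (fun j => (i, j)))
def pvE (rosters : List (List (String × Int))) : List (String × Int) :=
  (pvP rosters.length).flatMap (fun ij => pvBlk rosters ij.1 ij.2)
def pvIL (rosters : List (List (String × Int))) (c : String) : Int :=
  (pvI rosters c).getD ((pvI rosters c).length - 2) 0
def pvVal (rosters : List (List (String × Int))) (c : String) (i : Int) : Int :=
  (((pvR rosters i).filter (fun p => p.1 == c)).map Prod.snd).headD 0
def pvKey3 (rosters : List (List (String × Int))) (c : String) : List Int :=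
  [pvI1 rosters c, pvI2 rosters c, (pvPos rosters c (pvI1 rosters c) : Int)]
def pvLastV (E : List (String × Int)) (c : String) : Int :=
  ((E.filter (fun p => p.1 == c)).map Prod.snd).getLastD 0
def pvKA (rosters : List (List (String × Int))) : List String :=
  PySem.Set.ofList ((pvE rosters).map Prod.fst)
def pvCP (rosters : List (List (String × Int))) (c : String) : List (Int × Int) :=
  (pvI rosters c).flatMap (fun a => ((pvI rosters c).filter (fun b => a < b)).map (fun b => (a, b)))
def pvLtx (p q : Int × Int) : Prop := p.1 < q.1 ∨ (p.1 = q.1 ∧ p.2 < q.2)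

-- B-side proof objects
def pvLatB (rosters : List (List (String × Int))) (i : Int) (c : String) : Bool :=
  (PySem.List.pyRange (i+1) rosters.length).any (fun j => pvHasK rosters j c)
def pvEB (rosters : List (List (String × Int))) : List (String × Int) :=
  (PySem.List.pyRange 0 rosters.length).flatMap
    (fun i => (pvR rosters i).filter (fun cv => pvLatB rosters i cv.1))
def pvKB2 (rosters : List (List (String × Int))) : List String :=
  PySem.Set.ofList ((pvEB rosters).map Prod.fst)
def pvKeyL (rosters : List (List (String × Int))) (c : String) : List Int :=
  [pvI1 rosters c, (pvPos rosters c (pvI1 rosters c) : Int)]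
-- the backward-pass recursion: list of prefix unions / the total union
def pvF : List (List (String × Int)) → PySem.Set String → List (PySem.Set String)
  | [], _ => []
  | r :: t, s => s :: pvF t (PySem.Set.union s (PySem.Set.ofList (r.map Prod.fst)))
def pvU : List (List (String × Int)) → PySem.Set String → PySem.Set String
  | [], s => s
  | r :: t, s => pvU t (PySem.Set.union s (PySem.Set.ofList (r.map Prod.fst)))

-- ===== A-side reduction =====

theorem pv_foldl_const_insert (l : List (String × Int)) (k : String) (v : Int)
    (d : PySem.Dict String Int) :
    l.foldl (fun d q => if k == q.1 then d.insert k v else d) d =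
      if l.any (fun q => k == q.1) then d.insert k v else d := by
  induction l generalizing d with
  | nil => simp
  | cons a t ih =>
    simp only [List.foldl_cons, List.any_cons, Bool.or_eq_true]
    by_cases h : (k == a.1) = true
    · rw [if_pos h, ih]
      split_ifs with h2 h3 <;> simp_all [PySem.Dict.insert_insert_self]
    · rw [if_neg h, ih]
      split_ifs with h2 h3 <;> simp_all

theorem pvA_eq_foldE (rosters : List (List (String × Int))) :
    GetDuplicates rosters =
      ((pvE rosters).foldl (fun d p => d.insert p.1 p.2) PySem.Dict.empty).items := by
  unfold GetDuplicates
  simp only [pvE, pvP, pvBlk, pvHasK, pvR, List.foldl_flatMap, List.foldl_map]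
  simp only [pv_foldl_const_insert]
  simp only [PySem.List.foldl_if_eq_foldl_filter]

theorem pv_getD_foldl_insert (E : List (String × Int)) (d : PySem.Dict String Int)
    (c : String) (dflt : Int) :
    (E.foldl (fun d p => d.insert p.1 p.2) d).getD c dflt =
      ((E.filter (fun p => p.1 == c)).map Prod.snd).getLastD (d.getD c dflt) := by
  induction E generalizing d with
  | nil => simp
  | cons p t ih =>
    simp only [List.foldl_cons, List.filter_cons]
    by_cases h : p.1 = c
    · subst h
      simp only [BEq.rfl, if_pos trivial, List.map_cons, List.getLastD_cons, ih,
        PySem.Dict.getD_insert_self]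
    · have hb : (p.1 == c) = false := by simp [h]
      simp only [hb, Bool.false_eq_true, if_false, ih]
      rw [PySem.Dict.getD_insert_of_ne _ _ _ (fun hh => h hh.symm)]

theorem pv_items_foldl_insert (E : List (String × Int)) :
    (E.foldl (fun d p => d.insert p.1 p.2) PySem.Dict.empty).items =
      (PySem.Set.ofList (E.map Prod.fst)).map (fun c => (c, pvLastV E c)) := by
  have hkeys : (E.foldl (fun d p => d.insert p.1 p.2) PySem.Dict.empty).keys =
      PySem.Set.ofList (E.map Prod.fst) := by
    rw [PySem.Dict.keys_foldl_insert_key E Prod.fst (fun _ x => x.2) PySem.Dict.empty]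
    simp [PySem.Set.update_nil_left]
  have hnd : (E.foldl (fun d p => d.insert p.1 p.2) PySem.Dict.empty).keys.Nodup := by
    rw [hkeys]; exact PySem.Set.nodup_ofList _
  rw [PySem.Dict.items_eq_map_keys _ hnd (0 : Int), hkeys]
  apply List.map_congr_left
  intro c _
  rw [pv_getD_foldl_insert]
  simp [pvLastV]

-- ===== per-key structure of E =====

theorem pv_mem_P (n i j : Int) : (i, j) ∈ pvP n ↔ 0 ≤ i ∧ i < j ∧ j < n := by
  simp only [pvP, List.mem_flatMap, List.mem_map, PySem.List.mem_pyRange_one, Prod.mk.injEq]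
  constructor
  · rintro ⟨a, ⟨h1, h2⟩, b, ⟨h3, h4⟩, rfl, rfl⟩
    omega
  · rintro ⟨h1, h2, h3⟩
    exact ⟨i, ⟨h1, by omega⟩, j, ⟨by omega, h3⟩, rfl, rfl⟩

theorem pv_pyRange_pairwise (a b : Int) : (PySem.List.pyRange a b).Pairwise (· < ·) := by
  rw [PySem.List.pyRange_one]
  exact (List.pairwise_lt_range).map _ (fun x y h => by omega)

theorem pv_P_pairwise (n : Int) : (pvP n).Pairwise pvLtx := by
  unfold pvP
  apply List.pairwise_flatMap.2
  constructor
  · intro a _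
    exact (pv_pyRange_pairwise (a+1) n).map _ (fun x y h => Or.inr ⟨rfl, h⟩)
  · apply (pv_pyRange_pairwise 0 n).imp_of_mem
    rintro a b _ _ hab
    simp only [List.mem_map]
    rintro x ⟨j, _, rfl⟩ y ⟨k, _, rfl⟩
    exact Or.inl hab

theorem pv_I_pairwise (rosters : List (List (String × Int))) (c : String) :
    (pvI rosters c).Pairwise (· < ·) := by
  exact (pv_pyRange_pairwise 0 rosters.length).filter _

theorem pv_mem_I (rosters : List (List (String × Int))) (c : String) (i : Int) :
    i ∈ pvI rosters c ↔ (0 ≤ i ∧ i < rosters.length ∧ pvHasK rosters i c = true) := by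
  simp [pvI, List.mem_filter, PySem.List.mem_pyRange_one, and_assoc]

theorem pv_flatMap_filter {α β : Type} (l : List α) (q : α → Bool) (g : α → List β) :
    (l.filter q).flatMap g = l.flatMap (fun x => if q x then g x else []) := by
  induction l with
  | nil => rfl
  | cons a t ih => by_cases h : q a <;> simp [h, ih]

theorem pv_flatMap_if_singleton {α β : Type} (l : List α) (q : α → Bool) (f : α → β) :
    l.flatMap (fun x => if q x then [f x] else []) = (l.filter q).map f := by
  induction l with
  | nil => rfl
  | cons a t ih => by_cases h : q a <;> simp [h, ih]

theorem pv_filter_key (r : List (String × Int)) (c : String) (hnd : (r.map Prod.fst).Nodup) :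
    r.filter (fun p => p.1 == c) =
      if r.any (fun q => c == q.1) then
        [(c, ((r.filter (fun p => p.1 == c)).map Prod.snd).headD 0)]
      else [] := by
  induction r with
  | nil => simp
  | cons a t ih =>
    simp only [List.map_cons, List.nodup_cons] at hnd
    obtain ⟨hnd1, hnd2⟩ := hnd
    by_cases h : a.1 = c
    · subst h
      have ht : t.filter (fun p => p.1 == a.1) = [] := by
        apply List.filter_eq_nil_iff.2
        intro p hp
        simp only [beq_iff_eq]
        intro hpe
        exact hnd1 (hpe ▸ List.mem_map_of_mem hp)
      simp [ht]
    · have hb : (a.1 == c) = false := by simp [h]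
      have hb2 : (c == a.1) = false := by simp only [beq_eq_false_iff_ne, ne_eq]; exact fun e => h e.symm
      simp only [List.filter_cons, hb, Bool.false_eq_true, if_false, List.any_cons, hb2,
        Bool.false_or]
      exact ih hnd2

theorem pv_roster_mem (rosters : List (List (String × Int))) (i : Int) (h0 : 0 ≤ i)
    (h1 : i < rosters.length) : pvR rosters i ∈ rosters := by
  unfold pvR
  rw [PySem.List.pyGetD_of_nonneg _ _ h0,
    List.getD_eq_getElem _ _ (by omega : i.toNat < rosters.length)]
  exact List.getElem_mem _

theorem pv_blk_filter (rosters : List (List (String × Int)))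
    (hnd : ∀ r ∈ rosters, (r.map Prod.fst).Nodup) (i j : Int) (hi : 0 ≤ i) (hi2 : i < rosters.length)
    (c : String) :
    (pvBlk rosters i j).filter (fun p => p.1 == c) =
      if pvHasK rosters i c && pvHasK rosters j c then [(c, pvVal rosters c i)] else [] := by
  have hndi := hnd _ (pv_roster_mem rosters i hi hi2)
  unfold pvBlk
  rw [List.filter_filter]
  by_cases hj : pvHasK rosters j c = true
  · have hcg : ∀ p ∈ pvR rosters i, (((p.1 == c) && pvHasK rosters j p.1) = (p.1 == c)) := by
      intro p _
      by_cases hpc : p.1 = c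
      · simp [hpc, hj]
      · simp [hpc]
    rw [List.filter_congr hcg, pv_filter_key _ c hndi]
    have : (pvR rosters i).any (fun q => c == q.1) = pvHasK rosters i c := rfl
    rw [this]
    by_cases hic : pvHasK rosters i c = true <;> simp [hic, hj, pvVal]
  · have hng : (pvR rosters i).filter (fun p => (p.1 == c) && pvHasK rosters j p.1) = [] := by
      apply List.filter_eq_nil_iff.2
      intro p _
      by_cases hpc : p.1 = c
      · simp [hpc, hj]
      · simp [hpc]
    rw [hng]
    simp [hj]

theorem pv_CP_eq (rosters : List (List (String × Int))) (c : String) :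
    pvCP rosters c =
      (pvP rosters.length).filter
        (fun ij => pvHasK rosters ij.1 c && pvHasK rosters ij.2 c) := by
  unfold pvCP pvP pvI
  rw [List.filter_flatMap, pv_flatMap_filter]
  apply List.flatMap_congr
  intro i hi
  rw [List.filter_map]
  by_cases hic : pvHasK rosters i c = true
  · rw [if_pos hic]
    have hsplit : PySem.List.pyRange 0 (rosters.length : Int) =
        PySem.List.pyRange 0 (i+1) ++ PySem.List.pyRange (i+1) rosters.length := by
      apply PySem.List.pyRange_one_append
      · have := (PySem.List.mem_pyRange_one.1 hi).1; omega
      · have := (PySem.List.mem_pyRange_one.1 hi).2; omega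
    have hkey : ((PySem.List.pyRange 0 (rosters.length : Int)).filter
          (fun x => pvHasK rosters x c)).filter (fun b => decide (i < b)) =
        (PySem.List.pyRange (i+1) rosters.length).filter (fun x => pvHasK rosters x c) := by
      rw [hsplit, List.filter_append, List.filter_append]
      have h1 : ((PySem.List.pyRange 0 (i+1)).filter (fun x => pvHasK rosters x c)).filter
          (fun b => decide (i < b)) = [] := by
        apply List.filter_eq_nil_iff.2
        intro b hb
        have := PySem.List.mem_pyRange_one.1 (List.mem_of_mem_filter hb)
        simp; omega
      have h2 : ((PySem.List.pyRange (i+1) (rosters.length : Int)).filter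
          (fun x => pvHasK rosters x c)).filter (fun b => decide (i < b)) =
          (PySem.List.pyRange (i+1) (rosters.length : Int)).filter (fun x => pvHasK rosters x c) := by
        apply List.filter_eq_self.2
        intro b hb
        have := PySem.List.mem_pyRange_one.1 (List.mem_of_mem_filter hb)
        simp; omega
      rw [h1, h2, List.nil_append]
    rw [hkey]
    have hand : (PySem.List.pyRange (i+1) (rosters.length : Int)).filter
        ((fun ij => pvHasK rosters ij.1 c && pvHasK rosters ij.2 c) ∘ fun j => (i, j)) =
        (PySem.List.pyRange (i+1) (rosters.length : Int)).filter (fun x => pvHasK rosters x c) := by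
      apply List.filter_congr
      intro b _
      simp [Function.comp, hic]
    rw [hand]
  · rw [if_neg hic]
    have hnil : (PySem.List.pyRange (i+1) (rosters.length : Int)).filter
        ((fun ij => pvHasK rosters ij.1 c && pvHasK rosters ij.2 c) ∘ fun j => (i, j)) = [] := by
      apply List.filter_eq_nil_iff.2
      intro b _
      simp [Function.comp, hic]
    rw [hnil]
    simp

theorem pv_filterE (rosters : List (List (String × Int)))
    (hnd : ∀ r ∈ rosters, (r.map Prod.fst).Nodup) (c : String) :
    (pvE rosters).filter (fun p => p.1 == c) =
      (pvCP rosters c).map (fun ij => (c, pvVal rosters c ij.1)) := by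
  unfold pvE
  rw [List.filter_flatMap, pv_CP_eq]
  have hcg : ∀ ij ∈ pvP (rosters.length : Int),
      (pvBlk rosters ij.1 ij.2).filter (fun p => p.1 == c) =
        (fun ij => if pvHasK rosters ij.1 c && pvHasK rosters ij.2 c then
          [(c, pvVal rosters c ij.1)] else []) ij := by
    rintro ⟨i, j⟩ hij
    obtain ⟨h1, h2, h3⟩ := (pv_mem_P _ _ _).1 hij
    exact pv_blk_filter rosters hnd i j h1 (by omega) c
  rw [List.flatMap_congr hcg, pv_flatMap_if_singleton]

theorem pv_CP_eq_nil (rosters : List (List (String × Int))) (c : String)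
    (h : (pvI rosters c).length < 2) : pvCP rosters c = [] := by
  unfold pvCP
  match hI : pvI rosters c with
  | [] => simp
  | [x] => simp
  | x :: y :: u => rw [hI] at h; simp at h

theorem pv_two_split {α : Type} [Inhabited α] (l : List α) (h : 2 ≤ l.length) :
    l = l.take (l.length - 2) ++ [l.getD (l.length - 2) default, l.getD (l.length - 1) default] := by
  have h1 : l.length - 2 < l.length := by omega
  have h2 : l.length - 1 < l.length := by omega
  have e1 : l.length - 2 + 1 = l.length - 1 := by omega
  have e2 : l.length - 1 + 1 = l.length := by omega
  have hd1 := List.drop_eq_getElem_cons h1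
  rw [e1] at hd1
  have hd2 := List.drop_eq_getElem_cons h2
  rw [e2] at hd2
  conv_lhs => rw [← List.take_append_drop (l.length - 2) l]
  rw [hd1, hd2, List.drop_length, List.getD_eq_getElem _ _ h1, List.getD_eq_getElem _ _ h2]

theorem pv_CP_last (rosters : List (List (String × Int))) (c : String)
    (h : 2 ≤ (pvI rosters c).length) :
    ∃ L, pvCP rosters c = L ++ [(pvIL rosters c, (pvI rosters c).getD ((pvI rosters c).length - 1) 0)] := by
  set I := pvI rosters c with hIdef
  set x := I.getD (I.length - 2) 0 with hx
  set y := I.getD (I.length - 1) 0 with hy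
  have hsplit : I = I.take (I.length - 2) ++ [x, y] := pv_two_split I h
  have hpw : I.Pairwise (· < ·) := pv_I_pairwise rosters c
  have hmem_lt : ∀ b ∈ I.take (I.length - 2), b < x ∧ b < y := by
    intro b hb
    have := hsplit ▸ hpw
    rw [List.pairwise_append] at this
    exact ⟨(this.2.2 b hb x (by simp)), (this.2.2 b hb y (by simp))⟩
  have hxy : x < y := by
    have h2 := hsplit ▸ hpw
    rw [List.pairwise_append] at h2
    exact (List.pairwise_cons.1 h2.2.1).1 y (by simp)
  have hgy : (I.filter (fun b => decide (y < b))).map (fun b => (y, b)) = [] := by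
    have : I.filter (fun b => decide (y < b)) = [] := by
      apply List.filter_eq_nil_iff.2
      intro b hb
      rw [hsplit] at hb
      simp only [List.mem_append, List.mem_cons] at hb
      rcases hb with hb | hb | hb | hb
      · have := (hmem_lt b hb).2; simp; omega
      · subst hb; simp; omega
      · subst hb; simp
      · simp at hb
    rw [this]; rfl
  have hgx : (I.filter (fun b => decide (x < b))).map (fun b => (x, b)) = [(x, y)] := by
    have : I.filter (fun b => decide (x < b)) = [y] := by
      conv_lhs => rw [hsplit]
      rw [List.filter_append]
      have hA : (I.take (I.length - 2)).filter (fun b => decide (x < b)) = [] := by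
        apply List.filter_eq_nil_iff.2
        intro b hb
        have := (hmem_lt b hb).1; simp; omega
      rw [hA]
      simp [hxy]
    rw [this]; rfl
  refine ⟨(I.take (I.length - 2)).flatMap (fun a => (I.filter (fun b => decide (a < b))).map (fun b => (a, b))), ?_⟩
  have hIL : pvIL rosters c = x := rfl
  unfold pvCP
  rw [← hIdef]
  conv_lhs => rw [hsplit]
  rw [List.flatMap_append, List.flatMap_cons, List.flatMap_cons, List.flatMap_nil]
  rw [← hsplit, hgy, hgx, hIL]
  simp

theorem pv_lastV (rosters : List (List (String × Int)))
    (hnd : ∀ r ∈ rosters, (r.map Prod.fst).Nodup) (c : String) (h : 2 ≤ (pvI rosters c).length) :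
    pvLastV (pvE rosters) c = pvVal rosters c (pvIL rosters c) := by
  unfold pvLastV
  rw [pv_filterE rosters hnd c]
  obtain ⟨L, hL⟩ := pv_CP_last rosters c h
  rw [hL]
  simp

theorem pv_mem_KA (rosters : List (List (String × Int)))
    (hnd : ∀ r ∈ rosters, (r.map Prod.fst).Nodup) (c : String) :
    c ∈ pvKA rosters ↔ 2 ≤ (pvI rosters c).length := by
  have hfil := pv_filterE rosters hnd c
  unfold pvKA
  rw [PySem.Set.mem_ofList]
  constructor
  · intro hc
    by_contra hlt
    have hlt2 : (pvI rosters c).length < 2 := by omega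
    rw [pv_CP_eq_nil rosters c hlt2] at hfil
    simp only [List.map_nil] at hfil
    obtain ⟨p, hp, hpc⟩ := List.mem_map.1 hc
    have := List.filter_eq_nil_iff.1 hfil p hp
    simp [hpc] at this
  · intro h2
    obtain ⟨L, hL⟩ := pv_CP_last rosters c h2
    apply List.mem_map.2
    have hmem : (c, pvVal rosters c (pvIL rosters c)) ∈
        (pvE rosters).filter (fun p => p.1 == c) := by
      rw [hfil, hL]
      simp
    exact ⟨_, List.mem_of_mem_filter hmem, rfl⟩

-- ===== order of first insertions (A side) =====

def pvKB (rosters : List (List (String × Int))) (ij : Int × Int) : List String :=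
  (pvBlk rosters ij.1 ij.2).map Prod.fst
def pvFP (rosters : List (List (String × Int))) (c : String) : Int × Int :=
  (pvI1 rosters c, pvI2 rosters c)

theorem pv_mem_KB (rosters : List (List (String × Int))) (ij : Int × Int) (c : String) :
    c ∈ pvKB rosters ij ↔
      (pvHasK rosters ij.1 c = true ∧ pvHasK rosters ij.2 c = true) := by
  unfold pvKB pvBlk pvHasK
  simp only [List.mem_map, List.mem_filter, List.any_eq_true, beq_iff_eq]
  constructor
  · rintro ⟨p, ⟨hp, hj⟩, rfl⟩
    exact ⟨⟨p, hp, rfl⟩, hj⟩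
  · rintro ⟨⟨q, hq, rfl⟩, hj⟩
    exact ⟨q, ⟨hq, hj⟩, rfl⟩

theorem pv_ltx_asymm {p q : Int × Int} (h1 : pvLtx p q) (h2 : pvLtx q p) : False := by
  rcases h1 with h | ⟨h, h'⟩ <;> rcases h2 with g | ⟨g, g'⟩ <;> omega

theorem pv_key3_lt_of_ltx (rosters : List (List (String × Int))) (a b : String)
    (h : pvLtx (pvFP rosters a) (pvFP rosters b)) :
    pvKey3 rosters a < pvKey3 rosters b := by
  unfold pvFP at h
  rcases h with h | ⟨h, h'⟩
  · exact (List.cons_lt_cons_iff).2 (Or.inl h)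
  · exact (List.cons_lt_cons_iff).2 (Or.inr ⟨h, (List.cons_lt_cons_iff).2 (Or.inl h')⟩)

theorem pv_key3_lt_of_pos (rosters : List (List (String × Int))) (a b : String)
    (h : pvFP rosters a = pvFP rosters b)
    (hp : pvPos rosters a (pvI1 rosters a) < pvPos rosters b (pvI1 rosters b)) :
    pvKey3 rosters a < pvKey3 rosters b := by
  unfold pvFP at h
  rw [Prod.mk.injEq] at h
  apply (List.cons_lt_cons_iff).2
  refine Or.inr ⟨h.1, (List.cons_lt_cons_iff).2 (Or.inr ⟨h.2, ?_⟩)⟩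
  exact (List.cons_lt_cons_iff).2 (Or.inl (by exact_mod_cast hp))

theorem pv_nodup_idxOf_pairwise {α : Type} [BEq α] [LawfulBEq α] (t : List α)
    (hnd : t.Nodup) : t.Pairwise (fun a b => t.idxOf a < t.idxOf b) := by
  induction t with
  | nil => simp
  | cons x xs ih =>
    obtain ⟨hx, hnd2⟩ := List.nodup_cons.1 hnd
    apply List.pairwise_cons.2
    constructor
    · intro b hb
      have hbx : b ≠ x := fun e => hx (e ▸ hb)
      rw [List.idxOf_cons_self, List.idxOf_cons_ne _ (fun e => hbx e.symm)]
      omega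
    · apply (ih hnd2).imp_of_mem
      intro a b ha hb hab
      have hax : a ≠ x := fun e => hx (e ▸ ha)
      have hbx : b ≠ x := fun e => hx (e ▸ hb)
      rw [List.idxOf_cons_ne _ (fun e => hax e.symm), List.idxOf_cons_ne _ (fun e => hbx e.symm)]
      omega

theorem pv_fp_min (rosters : List (List (String × Int))) (c : String) (i j : Int)
    (hij : (i, j) ∈ pvP rosters.length) (hic : pvHasK rosters i c = true)
    (hjc : pvHasK rosters j c = true) :
    2 ≤ (pvI rosters c).length ∧ pvFP rosters c ∈ pvP rosters.length ∧
      (pvFP rosters c = (i, j) ∨ pvLtx (pvFP rosters c) (i, j)) ∧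
      pvHasK rosters (pvI1 rosters c) c = true ∧ pvHasK rosters (pvI2 rosters c) c = true := by
  obtain ⟨h0, h1, h2⟩ := (pv_mem_P _ _ _).1 hij
  have hiI : i ∈ pvI rosters c := (pv_mem_I _ _ _).2 ⟨h0, by omega, hic⟩
  have hjI : j ∈ pvI rosters c := (pv_mem_I _ _ _).2 ⟨by omega, h2, hjc⟩
  match hI : pvI rosters c with
  | [] => rw [hI] at hiI; simp at hiI
  | [x] =>
    rw [hI] at hiI hjI
    simp at hiI hjI
    omega
  | x :: y :: rest =>
    have hI1 : pvI1 rosters c = x := by unfold pvI1; rw [hI]; rfl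
    have hI2 : pvI2 rosters c = y := by unfold pvI2; rw [hI]; rfl
    have hpw := pv_I_pairwise rosters c
    rw [hI] at hpw hiI hjI
    have hxy : x < y := (List.pairwise_cons.1 hpw).1 y (by simp)
    have hxmem : x ∈ pvI rosters c := by rw [hI]; simp
    have hymem : y ∈ pvI rosters c := by rw [hI]; simp
    obtain ⟨hx0, hx1, hxk⟩ := (pv_mem_I _ _ _).1 hxmem
    obtain ⟨hy0, hy1, hyk⟩ := (pv_mem_I _ _ _).1 hymem
    refine ⟨by simp, ?_, ?_, by rw [hI1]; exact hxk, by rw [hI2]; exact hyk⟩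
    · unfold pvFP
      rw [hI1, hI2]
      exact (pv_mem_P _ _ _).2 ⟨hx0, hxy, hy1⟩
    · unfold pvFP
      rw [hI1, hI2]
      rcases List.mem_cons.1 hiI with rfl | hi'
      · rcases List.mem_cons.1 hjI with rfl | hj'
        · omega
        · rcases List.mem_cons.1 hj' with rfl | hj''
          · exact Or.inl rfl
          · have : y < j := (List.pairwise_cons.1 (List.pairwise_cons.1 hpw).2).1 j hj''
            exact Or.inr (Or.inr ⟨rfl, this⟩)
      · have : x < i := (List.pairwise_cons.1 hpw).1 i hi'
        exact Or.inr (Or.inl this)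

theorem pv_KB_pairwise (rosters : List (List (String × Int)))
    (hnd : ∀ r ∈ rosters, (r.map Prod.fst).Nodup) (ij : Int × Int) (hij : ij ∈ pvP rosters.length) :
    (pvKB rosters ij).Nodup ∧
      (pvKB rosters ij).Pairwise (fun a b =>
        List.idxOf a ((pvR rosters ij.1).map Prod.fst) <
          List.idxOf b ((pvR rosters ij.1).map Prod.fst)) := by
  obtain ⟨i, j⟩ := ij
  obtain ⟨h0, h1, h2⟩ := (pv_mem_P _ _ _).1 hij
  have hndi := hnd _ (pv_roster_mem rosters i h0 (by omega))
  have hsub : List.Sublist (pvKB rosters (i, j)) ((pvR rosters i).map Prod.fst) := by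
    unfold pvKB pvBlk
    exact List.filter_sublist.map Prod.fst
  exact ⟨hndi.sublist hsub, (pv_nodup_idxOf_pairwise _ hndi).sublist hsub⟩

theorem pv_KA_prefix (rosters : List (List (String × Int)))
    (hnd : ∀ r ∈ rosters, (r.map Prod.fst).Nodup) :
    ∀ Q rest, pvP rosters.length = Q ++ rest →
      (PySem.Set.ofList (Q.flatMap (pvKB rosters))).Pairwise
          (fun a b => pvKey3 rosters a < pvKey3 rosters b) ∧
        ∀ c ∈ PySem.Set.ofList (Q.flatMap (pvKB rosters)), pvFP rosters c ∈ Q := by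
  intro Q
  induction Q using List.reverseRecOn with
  | nil => simp
  | append_singleton Q b ih =>
    intro rest hP
    obtain ⟨ihpw, ihfp⟩ := ih (b :: rest) (by rw [hP, List.append_assoc]; rfl)
    have hbP : b ∈ pvP rosters.length := by rw [hP]; simp
    have hQsub : ∀ q ∈ Q, pvLtx q b := by
      have hpw := pv_P_pairwise (rosters.length : Int)
      rw [hP] at hpw
      have := hpw.sublist (List.sublist_append_left (Q ++ [b]) rest)
      rw [List.pairwise_append] at this
      intro q hq
      exact this.2.2 q hq b (by simp)
    have hflat : (Q ++ [b]).flatMap (pvKB rosters) =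
        Q.flatMap (pvKB rosters) ++ pvKB rosters b := by
      rw [List.flatMap_append]
      simp
    rw [hflat, PySem.Set.ofList_append, PySem.Set.update_eq_append_filter]
    set KAQ := PySem.Set.ofList (Q.flatMap (pvKB rosters)) with hKAQ
    set newK := (PySem.Set.ofList (pvKB rosters b)).filter
      (fun y => !(PySem.Set.contains KAQ y)) with hnewK
    have hnew_fp : ∀ c ∈ newK, pvFP rosters c = b := by
      intro c hc
      obtain ⟨hc1, hc2⟩ := List.mem_filter.1 hc
      have hcb : c ∈ pvKB rosters b := (PySem.Set.mem_ofList _ _).1 hc1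
      have hcnot : c ∉ KAQ := by
        intro hmem
        rw [← PySem.Set.contains_iff] at hmem
        rw [hmem] at hc2
        simp at hc2
      have hb2 := (pv_mem_KB rosters b c).1 hcb
      obtain ⟨hk2, hfpP, hmin, hk1c, hk2c⟩ := pv_fp_min rosters c b.1 b.2 hbP hb2.1 hb2.2
      rcases hmin with heq | hlt
      · exact heq
      · exfalso
        have hfpQ : pvFP rosters c ∈ Q := by
          rw [hP] at hfpP
          rcases List.mem_append.1 hfpP with hl | hr
          · rcases List.mem_append.1 hl with hq | hb1
            · exact hq
            · simp at hb1
              rw [hb1] at hlt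
              rcases hlt with h | ⟨h, h'⟩ <;> omega
          · exfalso
            have hpw := pv_P_pairwise (rosters.length : Int)
            rw [hP] at hpw
            rw [List.pairwise_append] at hpw
            have := hpw.2.2 b (by simp) _ hr
            exact pv_ltx_asymm this hlt
        apply hcnot
        rw [hKAQ, PySem.Set.mem_ofList]
        apply List.mem_flatMap.2
        refine ⟨pvFP rosters c, hfpQ, ?_⟩
        apply (pv_mem_KB rosters _ c).2
        exact ⟨hk1c, hk2c⟩
    constructor
    · rw [List.pairwise_append]
      refine ⟨ihpw, ?_, ?_⟩
      · have hKB := pv_KB_pairwise rosters hnd b hbP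
        have hself : PySem.Set.ofList (pvKB rosters b) = pvKB rosters b :=
          PySem.Set.ofList_eq_self_of_nodup _ hKB.1
        rw [hnewK, hself]
        apply (hKB.2.filter _).imp_of_mem
        intro a a' ha ha' hlt
        have hfa := hnew_fp a (by rw [hnewK, hself]; exact ha)
        have hfa' := hnew_fp a' (by rw [hnewK, hself]; exact ha')
        apply pv_key3_lt_of_pos rosters a a' (by rw [hfa, hfa'])
        have e1 : pvI1 rosters a = b.1 := congrArg Prod.fst hfa
        have e1' : pvI1 rosters a' = b.1 := congrArg Prod.fst hfa'
        unfold pvPos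
        rw [e1, e1']
        exact hlt
      · intro c' hc' c hc
        have hfc := hnew_fp c hc
        have hfc' := ihfp c' hc'
        apply pv_key3_lt_of_ltx
        rw [hfc]
        exact hQsub _ hfc'
    · intro c hc
      rcases List.mem_append.1 hc with hl | hr
      · exact List.mem_append.2 (Or.inl (ihfp c hl))
      · exact List.mem_append.2 (Or.inr (by rw [hnew_fp c hr]; simp))

theorem pv_KA_pairwise (rosters : List (List (String × Int)))
    (hnd : ∀ r ∈ rosters, (r.map Prod.fst).Nodup) :
    (pvKA rosters).Pairwise (fun a b => pvKey3 rosters a < pvKey3 rosters b) := by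
  have hE : (pvE rosters).map Prod.fst = (pvP rosters.length).flatMap (pvKB rosters) := by
    unfold pvE pvKB
    rw [List.map_flatMap]
  unfold pvKA
  rw [hE]
  exact (pv_KA_prefix rosters hnd (pvP rosters.length) [] (by simp)).1

-- ===== B-side reduction =====

theorem pv_fold_later (rs : List (List (String × Int))) (L : List (PySem.Set String))
    (s : PySem.Set String) :
    rs.foldl (fun (p : List (PySem.Set String) × PySem.Set String) r =>
        (p.1 ++ [p.2], PySem.Set.union p.2 (PySem.Set.ofList (r.map Prod.fst)))) (L, s) =
      (L ++ pvF rs s, pvU rs s) := by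
  induction rs generalizing L s with
  | nil => simp [pvF, pvU]
  | cons r t ih =>
    simp only [List.foldl_cons, pvF, pvU, ih, List.append_assoc, List.singleton_append]

theorem pv_length_pvF (rs : List (List (String × Int))) (s : PySem.Set String) :
    (pvF rs s).length = rs.length := by
  induction rs generalizing s with
  | nil => rfl
  | cons r t ih => simp [pvF, ih]

theorem pv_mem_pvU (rs : List (List (String × Int))) (s : PySem.Set String) (c : String) :
    c ∈ pvU rs s ↔ c ∈ s ∨ ∃ r ∈ rs, c ∈ r.map Prod.fst := by
  induction rs generalizing s with
  | nil => simp [pvU]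
  | cons r t ih =>
    simp only [pvU, ih, PySem.Set.mem_union, PySem.Set.mem_ofList, List.mem_cons]
    constructor
    · rintro ((h | h) | ⟨r', hr', hc⟩)
      · exact Or.inl h
      · exact Or.inr ⟨r, Or.inl rfl, h⟩
      · exact Or.inr ⟨r', Or.inr hr', hc⟩
    · rintro (h | ⟨r', (rfl | hr'), hc⟩)
      · exact Or.inl (Or.inl h)
      · exact Or.inl (Or.inr hc)
      · exact Or.inr ⟨r', hr', hc⟩

theorem pv_getElem_pvF (rs : List (List (String × Int))) (s : PySem.Set String) (k : Nat)
    (hk : k < (pvF rs s).length) : (pvF rs s)[k] = pvU (rs.take k) s := by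
  induction rs generalizing s k with
  | nil => simp [pvF] at hk
  | cons r t ih =>
    match k with
    | 0 => rfl
    | k + 1 =>
      have hk' : k < (pvF t (s.union (PySem.Set.ofList (r.map Prod.fst)))).length := by
        simpa [pvF] using hk
      show (pvF t _)[k]'hk' = _
      rw [ih _ _ hk']
      rfl

-- the port's later[i] test is exactly pvLatB
theorem pv_later_contains (rosters : List (List (String × Int))) (i : Int)
    (h0 : 0 ≤ i) (h1 : i < rosters.length) (c : String) :
    PySem.Set.contains
      (PySem.List.pyGetD ((pvF rosters.reverse PySem.Set.empty).reverse) i PySem.Set.empty) c =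
    pvLatB rosters i c := by
  have hlen : ((pvF rosters.reverse PySem.Set.empty).reverse).length = rosters.length := by
    rw [List.length_reverse, pv_length_pvF, List.length_reverse]
  rw [PySem.List.pyGetD_eq_getElem _ _ h0 (by rw [hlen]; exact_mod_cast h1)]
  have hklt : i.toNat < (pvF rosters.reverse PySem.Set.empty).length := by
    rw [pv_length_pvF, List.length_reverse]; omega
  rw [List.getElem_reverse (by omega)]
  rw [pv_getElem_pvF _ _ _ (by rw [pv_length_pvF] at hklt ⊢; omega)]
  rw [List.take_reverse]
  have hidx : rosters.length - ((pvF rosters.reverse PySem.Set.empty).length - 1 - i.toNat) =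
      i.toNat + 1 := by
    rw [pv_length_pvF, List.length_reverse]; omega
  rw [hidx]
  rw [Bool.eq_iff_iff, PySem.Set.contains_iff, pv_mem_pvU]
  unfold pvLatB
  rw [List.any_eq_true]
  constructor
  · rintro (h | ⟨r, hr, hc⟩)
    · simp [PySem.Set.empty] at h
    · rw [List.mem_reverse] at hr
      obtain ⟨m, hm, hget⟩ := List.getElem_of_mem hr
      rw [List.getElem_drop] at hget
      have hmlen : i.toNat + 1 + m < rosters.length := by
        have := hm; rw [List.length_drop] at this; omega
      refine ⟨(i.toNat + 1 + m : Nat), ?_, ?_⟩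
      · rw [PySem.List.mem_pyRange_one]; constructor <;> [omega; exact_mod_cast hmlen]
      · unfold pvHasK pvR
        rw [PySem.List.pyGetD_eq_getElem _ _ (by positivity) (by exact_mod_cast hmlen)]
        rw [List.any_eq_true]
        simp only [Int.toNat_natCast]
        obtain ⟨q, hq, hqc⟩ := List.mem_map.1 (hget ▸ hc)
        exact ⟨q, hq, by simp [hqc]⟩
  · rintro ⟨j, hj, hk⟩
    obtain ⟨hj1, hj2⟩ := PySem.List.mem_pyRange_one.1 hj
    right
    refine ⟨pvR rosters j, ?_, ?_⟩
    · rw [List.mem_reverse]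
      unfold pvR
      rw [PySem.List.pyGetD_eq_getElem _ _ (by omega) (by exact_mod_cast hj2)]
      have : rosters[j.toNat] ∈ rosters.drop (i.toNat + 1) := by
        rw [List.mem_iff_getElem]
        refine ⟨j.toNat - (i.toNat + 1), by rw [List.length_drop]; omega, ?_⟩
        rw [List.getElem_drop]
        congr 1
        omega
      exact this
    · unfold pvHasK at hk
      obtain ⟨q, hq, hqc⟩ := List.any_eq_true.1 hk
      rw [show c = q.1 from by simpa using hqc]
      exact List.mem_map_of_mem hq

-- reduce the port of B to a fold over pvEB
theorem pvB_eq_foldEB (rosters : List (List (String × Int))) :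
    GetDuplicates_alt rosters =
      ((pvEB rosters).foldl (fun d p => d.insert p.1 p.2) PySem.Dict.empty).items := by
  unfold GetDuplicates_alt
  rw [pv_fold_later]
  simp only [List.nil_append]
  rw [PySem.List.enumerate_eq_map_pyRange rosters ([] : List (String × Int)), List.foldl_map]
  unfold pvEB
  rw [List.foldl_flatMap]
  rw [PySem.List.len_eq]
  congr 1
  apply PySem.List.foldl_congr_mem
  intro d j hj
  obtain ⟨h0, h1⟩ := PySem.List.mem_pyRange_one.1 hj
  dsimp only
  have hcond : ∀ (d' : PySem.Dict String Int) (cv : String × Int),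
      cv ∈ PySem.List.pyGetD rosters j [] →
      (if PySem.Set.contains
          (PySem.List.pyGetD ((pvF rosters.reverse PySem.Set.empty).reverse) j PySem.Set.empty)
          cv.1 = true
       then d'.insert cv.1 cv.2 else d') =
      (if pvLatB rosters j cv.1 = true then d'.insert cv.1 cv.2 else d') := by
    intro d' cv _
    rw [pv_later_contains rosters j h0 h1 cv.1]
  have h1 := PySem.List.foldl_congr_mem (PySem.List.pyGetD rosters j [])
    (fun (dup : PySem.Dict String Int) cv =>
      if PySem.Set.contains
          (PySem.List.pyGetD ((pvF rosters.reverse PySem.Set.empty).reverse) j PySem.Set.empty)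
          cv.1 = true
      then dup.insert cv.1 cv.2 else dup)
    (fun (dup : PySem.Dict String Int) cv =>
      if pvLatB rosters j cv.1 = true then dup.insert cv.1 cv.2 else dup) d hcond
  refine h1.trans ?_
  exact PySem.List.foldl_if_eq_foldl_filter (fun cv => pvLatB rosters j cv.1)
    (fun (d : PySem.Dict String Int) p => d.insert p.1 p.2) (PySem.List.pyGetD rosters j []) d

-- pvLatB on a valid index says: some occurrence of c lies strictly beyond i
theorem pv_latB_iff (rosters : List (List (String × Int))) (i : Int) (h0 : 0 ≤ i) (c : String) :
    pvLatB rosters i c = true ↔ ∃ j ∈ pvI rosters c, i < j := by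
  unfold pvLatB
  rw [List.any_eq_true]
  constructor
  · rintro ⟨j, hj, hk⟩
    obtain ⟨hj1, hj2⟩ := PySem.List.mem_pyRange_one.1 hj
    exact ⟨j, (pv_mem_I _ _ _).2 ⟨by omega, hj2, hk⟩, by omega⟩
  · rintro ⟨j, hj, hij⟩
    obtain ⟨hj0, hj1, hk⟩ := (pv_mem_I _ _ _).1 hj
    exact ⟨j, PySem.List.mem_pyRange_one.2 ⟨by omega, hj1⟩, hk⟩

-- in a strictly increasing list, the elements with a strictly larger member are all but the last
theorem pv_filter_exists_gt (I : List Int) (hpw : I.Pairwise (· < ·)) :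
    I.filter (fun i => decide (∃ j ∈ I, i < j)) = I.take (I.length - 1) := by
  induction I with
  | nil => rfl
  | cons a t ih =>
    match t, hpw with
    | [], _ => simp
    | b :: t', hpw =>
      have hab : a < b := (List.pairwise_cons.1 hpw).1 b (by simp)
      have ha : (decide (∃ j ∈ a :: b :: t', a < j)) = true := by
        simp only [decide_eq_true_iff]
        exact ⟨b, by simp, hab⟩
      have htl : ∀ i ∈ b :: t',
          (decide (∃ j ∈ a :: b :: t', i < j)) = (decide (∃ j ∈ b :: t', i < j)) := by
        intro i hi
        have hai : a < i := (List.pairwise_cons.1 hpw).1 i hi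
        rw [Bool.eq_iff_iff]
        simp only [decide_eq_true_iff, List.mem_cons]
        constructor
        · rintro ⟨j, (rfl | hj), hij⟩
          · omega
          · exact ⟨j, hj, hij⟩
        · rintro ⟨j, hj, hij⟩
          exact ⟨j, Or.inr hj, hij⟩
      rw [List.filter_cons, if_pos ha, List.filter_congr htl,
        ih (List.pairwise_cons.1 hpw).2]
      rfl

-- the occurrence indices that still have a later occurrence: all but the last
theorem pv_I_filter_lat (rosters : List (List (String × Int))) (c : String) :
    (pvI rosters c).filter (fun i => pvLatB rosters i c) =
      (pvI rosters c).take ((pvI rosters c).length - 1) := by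
  have hcg : ∀ i ∈ pvI rosters c,
      pvLatB rosters i c = decide (∃ j ∈ pvI rosters c, i < j) := by
    intro i hi
    have h0 : 0 ≤ i := ((pv_mem_I _ _ _).1 hi).1
    rw [Bool.eq_iff_iff, pv_latB_iff rosters i h0 c, decide_eq_true_iff]
  rw [List.filter_congr hcg]
  exact pv_filter_exists_gt (pvI rosters c) (pv_I_pairwise rosters c)

-- one block of pvEB, filtered to a single key
theorem pv_blkB_filter (rosters : List (List (String × Int)))
    (hnd : ∀ r ∈ rosters, (r.map Prod.fst).Nodup) (i : Int) (hi : 0 ≤ i)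
    (hi2 : i < rosters.length) (c : String) :
    ((pvR rosters i).filter (fun cv => pvLatB rosters i cv.1)).filter (fun p => p.1 == c) =
      if pvHasK rosters i c && pvLatB rosters i c then [(c, pvVal rosters c i)] else [] := by
  have hndi := hnd _ (pv_roster_mem rosters i hi hi2)
  rw [List.filter_filter]
  by_cases hj : pvLatB rosters i c = true
  · have hcg : ∀ p ∈ pvR rosters i, (((p.1 == c) && pvLatB rosters i p.1) = (p.1 == c)) := by
      intro p _
      by_cases hpc : p.1 = c
      · simp [hpc, hj]
      · simp [hpc]
    rw [List.filter_congr hcg, pv_filter_key _ c hndi]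
    have : (pvR rosters i).any (fun q => c == q.1) = pvHasK rosters i c := rfl
    rw [this]
    by_cases hic : pvHasK rosters i c = true <;> simp [hic, hj, pvVal]
  · have hng : (pvR rosters i).filter (fun p => (p.1 == c) && pvLatB rosters i p.1) = [] := by
      apply List.filter_eq_nil_iff.2
      intro p _
      by_cases hpc : p.1 = c
      · simp [hpc, hj]
      · simp [hpc]
    rw [hng]
    simp [hj]

-- per-key contents of pvEB
theorem pv_filterEB (rosters : List (List (String × Int)))
    (hnd : ∀ r ∈ rosters, (r.map Prod.fst).Nodup) (c : String) :
    (pvEB rosters).filter (fun p => p.1 == c) =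
      ((pvI rosters c).take ((pvI rosters c).length - 1)).map (fun i => (c, pvVal rosters c i)) := by
  unfold pvEB
  rw [List.filter_flatMap]
  have hcg : ∀ i ∈ PySem.List.pyRange 0 (rosters.length : Int),
      ((pvR rosters i).filter (fun cv => pvLatB rosters i cv.1)).filter (fun p => p.1 == c) =
        (fun i => if pvHasK rosters i c && pvLatB rosters i c then
          [(c, pvVal rosters c i)] else []) i := by
    intro i hi
    obtain ⟨h0, h1⟩ := PySem.List.mem_pyRange_one.1 hi
    exact pv_blkB_filter rosters hnd i h0 h1 c
  rw [List.flatMap_congr hcg, pv_flatMap_if_singleton]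
  have hff : (PySem.List.pyRange 0 (rosters.length : Int)).filter
        (fun i => pvHasK rosters i c && pvLatB rosters i c) =
      (pvI rosters c).filter (fun i => pvLatB rosters i c) := by
    unfold pvI
    rw [List.filter_filter]
    apply List.filter_congr
    intro i _
    rw [Bool.and_comm]
  rw [hff, pv_I_filter_lat]

theorem pv_mem_KB2 (rosters : List (List (String × Int)))
    (hnd : ∀ r ∈ rosters, (r.map Prod.fst).Nodup) (c : String) :
    c ∈ pvKB2 rosters ↔ 2 ≤ (pvI rosters c).length := by
  unfold pvKB2
  rw [PySem.Set.mem_ofList]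
  constructor
  · intro hc
    obtain ⟨p, hp, hpc⟩ := List.mem_map.1 hc
    have hpf : p ∈ (pvEB rosters).filter (fun p => p.1 == c) :=
      List.mem_filter.2 ⟨hp, by simp [hpc]⟩
    rw [pv_filterEB rosters hnd c] at hpf
    obtain ⟨i, hi, _⟩ := List.mem_map.1 hpf
    by_contra hlt
    have : (pvI rosters c).length - 1 = 0 := by omega
    rw [this] at hi
    simp at hi
  · intro h2
    have hlen : ((pvI rosters c).take ((pvI rosters c).length - 1)).length =
        (pvI rosters c).length - 1 := by
      rw [List.length_take]
      omega
    have hne : (pvI rosters c).take ((pvI rosters c).length - 1) ≠ [] := by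
      intro he
      rw [he] at hlen
      simp at hlen
      omega
    obtain ⟨i, hi⟩ := List.exists_mem_of_ne_nil _ hne
    have : (c, pvVal rosters c i) ∈ (pvEB rosters).filter (fun p => p.1 == c) := by
      rw [pv_filterEB rosters hnd c]
      exact List.mem_map_of_mem hi
    exact List.mem_map.2 ⟨_, List.mem_of_mem_filter this, rfl⟩

theorem pv_lastVB (rosters : List (List (String × Int)))
    (hnd : ∀ r ∈ rosters, (r.map Prod.fst).Nodup) (c : String) (h : 2 ≤ (pvI rosters c).length) :
    pvLastV (pvEB rosters) c = pvVal rosters c (pvIL rosters c) := by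
  unfold pvLastV
  rw [pv_filterEB rosters hnd c]
  set I := pvI rosters c with hIdef
  have htake : I.take (I.length - 1) = I.take (I.length - 2) ++ [I.getD (I.length - 2) 0] := by
    rw [show I.length - 1 = (I.length - 2) + 1 by omega, List.take_add_one,
      List.getElem?_eq_getElem (by omega : I.length - 2 < I.length),
      List.getD_eq_getElem _ _ (by omega : I.length - 2 < I.length)]
    rfl
  rw [htake]
  simp only [List.map_append, List.map_cons, List.map_nil, List.getLastD_concat]
  rfl

-- the keys contributed by roster i to pvEB
def pvKBL (rosters : List (List (String × Int))) (i : Int) : List String :=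
  ((pvR rosters i).filter (fun cv => pvLatB rosters i cv.1)).map Prod.fst

theorem pv_mem_KBL (rosters : List (List (String × Int))) (i : Int) (c : String) :
    c ∈ pvKBL rosters i ↔ (pvHasK rosters i c = true ∧ pvLatB rosters i c = true) := by
  unfold pvKBL pvHasK
  simp only [List.mem_map, List.mem_filter, List.any_eq_true, beq_iff_eq]
  constructor
  · rintro ⟨p, ⟨hp, hl⟩, rfl⟩
    exact ⟨⟨p, hp, rfl⟩, hl⟩
  · rintro ⟨⟨q, hq, rfl⟩, hl⟩
    exact ⟨q, ⟨hq, hl⟩, rfl⟩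

theorem pv_keyL_lt_of_i1 (rosters : List (List (String × Int))) (a b : String)
    (h : pvI1 rosters a < pvI1 rosters b) : pvKeyL rosters a < pvKeyL rosters b :=
  (List.cons_lt_cons_iff).2 (Or.inl h)

theorem pv_keyL_lt_of_pos (rosters : List (List (String × Int))) (a b : String)
    (h : pvI1 rosters a = pvI1 rosters b)
    (hp : pvPos rosters a (pvI1 rosters a) < pvPos rosters b (pvI1 rosters b)) :
    pvKeyL rosters a < pvKeyL rosters b := by
  apply (List.cons_lt_cons_iff).2
  exact Or.inr ⟨h, (List.cons_lt_cons_iff).2 (Or.inl (by exact_mod_cast hp))⟩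

-- the first occurrence index is minimal among indices whose block contains c
theorem pv_fpB_min (rosters : List (List (String × Int))) (c : String) (i : Int)
    (hi : i ∈ PySem.List.pyRange 0 (rosters.length : Int))
    (hic : pvHasK rosters i c = true) (hlc : pvLatB rosters i c = true) :
    2 ≤ (pvI rosters c).length ∧
      pvI1 rosters c ∈ PySem.List.pyRange 0 (rosters.length : Int) ∧
      (pvI1 rosters c = i ∨ pvI1 rosters c < i) ∧
      pvHasK rosters (pvI1 rosters c) c = true ∧ pvLatB rosters (pvI1 rosters c) c = true := by
  obtain ⟨h0, h1⟩ := PySem.List.mem_pyRange_one.1 hi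
  have hiI : i ∈ pvI rosters c := (pv_mem_I _ _ _).2 ⟨h0, h1, hic⟩
  obtain ⟨j, hjI, hij⟩ := (pv_latB_iff rosters i h0 c).1 hlc
  match hI : pvI rosters c with
  | [] => rw [hI] at hiI; simp at hiI
  | [x] =>
    rw [hI] at hiI hjI
    simp at hiI hjI
    omega
  | x :: y :: rest =>
    have hI1 : pvI1 rosters c = x := by unfold pvI1; rw [hI]; rfl
    have hpw := pv_I_pairwise rosters c
    rw [hI] at hpw hiI
    have hxy : x < y := (List.pairwise_cons.1 hpw).1 y (by simp)
    have hxmem : x ∈ pvI rosters c := by rw [hI]; simp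
    have hymem : y ∈ pvI rosters c := by rw [hI]; simp
    obtain ⟨hx0, hx1, hxk⟩ := (pv_mem_I _ _ _).1 hxmem
    refine ⟨by simp, ?_, ?_, by rw [hI1]; exact hxk, ?_⟩
    · rw [hI1]
      exact PySem.List.mem_pyRange_one.2 ⟨hx0, hx1⟩
    · rw [hI1]
      rcases List.mem_cons.1 hiI with rfl | hi'
      · exact Or.inl rfl
      · rcases List.mem_cons.1 hi' with rfl | hi''
        · exact Or.inr hxy
        · exact Or.inr ((List.pairwise_cons.1 hpw).1 i (by simp [hi'']))
    · rw [hI1]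
      exact (pv_latB_iff rosters x hx0 c).2 ⟨y, hymem, hxy⟩

theorem pv_KBL_pairwise (rosters : List (List (String × Int)))
    (hnd : ∀ r ∈ rosters, (r.map Prod.fst).Nodup) (i : Int)
    (hi : i ∈ PySem.List.pyRange 0 (rosters.length : Int)) :
    (pvKBL rosters i).Nodup ∧
      (pvKBL rosters i).Pairwise (fun a b =>
        List.idxOf a ((pvR rosters i).map Prod.fst) <
          List.idxOf b ((pvR rosters i).map Prod.fst)) := by
  obtain ⟨h0, h1⟩ := PySem.List.mem_pyRange_one.1 hi
  have hndi := hnd _ (pv_roster_mem rosters i h0 h1)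
  have hsub : List.Sublist (pvKBL rosters i) ((pvR rosters i).map Prod.fst) := by
    unfold pvKBL
    exact List.filter_sublist.map Prod.fst
  exact ⟨hndi.sublist hsub, (pv_nodup_idxOf_pairwise _ hndi).sublist hsub⟩

theorem pv_KB2_prefix (rosters : List (List (String × Int)))
    (hnd : ∀ r ∈ rosters, (r.map Prod.fst).Nodup) :
    ∀ Q rest, PySem.List.pyRange 0 (rosters.length : Int) = Q ++ rest →
      (PySem.Set.ofList (Q.flatMap (pvKBL rosters))).Pairwise
          (fun a b => pvKeyL rosters a < pvKeyL rosters b) ∧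
        ∀ c ∈ PySem.Set.ofList (Q.flatMap (pvKBL rosters)), pvI1 rosters c ∈ Q := by
  intro Q
  induction Q using List.reverseRecOn with
  | nil => simp
  | append_singleton Q b ih =>
    intro rest hP
    obtain ⟨ihpw, ihfp⟩ := ih (b :: rest) (by rw [hP, List.append_assoc]; rfl)
    have hbP : b ∈ PySem.List.pyRange 0 (rosters.length : Int) := by rw [hP]; simp
    have hQsub : ∀ q ∈ Q, q < b := by
      have hpw := pv_pyRange_pairwise 0 (rosters.length : Int)
      rw [hP] at hpw
      have := hpw.sublist (List.sublist_append_left (Q ++ [b]) rest)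
      rw [List.pairwise_append] at this
      intro q hq
      exact this.2.2 q hq b (by simp)
    have hflat : (Q ++ [b]).flatMap (pvKBL rosters) =
        Q.flatMap (pvKBL rosters) ++ pvKBL rosters b := by
      rw [List.flatMap_append]
      simp
    rw [hflat, PySem.Set.ofList_append, PySem.Set.update_eq_append_filter]
    set KAQ := PySem.Set.ofList (Q.flatMap (pvKBL rosters)) with hKAQ
    set newK := (PySem.Set.ofList (pvKBL rosters b)).filter
      (fun y => !(PySem.Set.contains KAQ y)) with hnewK
    have hnew_fp : ∀ c ∈ newK, pvI1 rosters c = b := by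
      intro c hc
      obtain ⟨hc1, hc2⟩ := List.mem_filter.1 hc
      have hcb : c ∈ pvKBL rosters b := (PySem.Set.mem_ofList _ _).1 hc1
      have hcnot : c ∉ KAQ := by
        intro hmem
        rw [← PySem.Set.contains_iff] at hmem
        rw [hmem] at hc2
        simp at hc2
      have hb2 := (pv_mem_KBL rosters b c).1 hcb
      obtain ⟨hk2, hfpP, hmin, hk1c, hk2c⟩ := pv_fpB_min rosters c b hbP hb2.1 hb2.2
      rcases hmin with heq | hlt
      · exact heq
      · exfalso
        have hfpQ : pvI1 rosters c ∈ Q := by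
          rw [hP] at hfpP
          rcases List.mem_append.1 hfpP with hl | hr
          · rcases List.mem_append.1 hl with hq | hb1
            · exact hq
            · simp at hb1
              omega
          · exfalso
            have hpw := pv_pyRange_pairwise 0 (rosters.length : Int)
            rw [hP] at hpw
            rw [List.pairwise_append] at hpw
            have := hpw.2.2 b (by simp) _ hr
            omega
        apply hcnot
        rw [hKAQ, PySem.Set.mem_ofList]
        apply List.mem_flatMap.2
        exact ⟨pvI1 rosters c, hfpQ, (pv_mem_KBL rosters _ c).2 ⟨hk1c, hk2c⟩⟩
    constructor
    · rw [List.pairwise_append]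
      refine ⟨ihpw, ?_, ?_⟩
      · have hKB := pv_KBL_pairwise rosters hnd b hbP
        have hself : PySem.Set.ofList (pvKBL rosters b) = pvKBL rosters b :=
          PySem.Set.ofList_eq_self_of_nodup _ hKB.1
        rw [hnewK, hself]
        apply (hKB.2.filter _).imp_of_mem
        intro a a' ha ha' hlt
        have hfa := hnew_fp a (by rw [hnewK, hself]; exact ha)
        have hfa' := hnew_fp a' (by rw [hnewK, hself]; exact ha')
        apply pv_keyL_lt_of_pos rosters a a' (by rw [hfa, hfa'])
        unfold pvPos
        rw [hfa, hfa']
        exact hlt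
      · intro c' hc' c hc
        have hfc := hnew_fp c hc
        have hfc' := ihfp c' hc'
        apply pv_keyL_lt_of_i1
        rw [hfc]
        exact hQsub _ hfc'
    · intro c hc
      rcases List.mem_append.1 hc with hl | hr
      · exact List.mem_append.2 (Or.inl (ihfp c hl))
      · exact List.mem_append.2 (Or.inr (by rw [hnew_fp c hr]; simp))

theorem pv_KB2_pairwise (rosters : List (List (String × Int)))
    (hnd : ∀ r ∈ rosters, (r.map Prod.fst).Nodup) :
    (pvKB2 rosters).Pairwise (fun a b => pvKeyL rosters a < pvKeyL rosters b) := by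
  have hE : (pvEB rosters).map Prod.fst =
      (PySem.List.pyRange 0 (rosters.length : Int)).flatMap (pvKBL rosters) := by
    unfold pvEB pvKBL
    rw [List.map_flatMap]
  unfold pvKB2
  rw [hE]
  exact (pv_KB2_prefix rosters hnd (PySem.List.pyRange 0 (rosters.length : Int)) [] (by simp)).1

-- two nodup lists, permutations of each other, both increasing under the same strict
-- order, are equal
theorem pv_perm_pairwise_eq {α : Type} (r : α → α → Prop)
    (hasym : ∀ a b, r a b → r b a → False) :
    ∀ l1 l2 : List α, l1.Perm l2 → l1.Pairwise r → l2.Pairwise r → l1 = l2 := by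
  intro l1
  induction l1 with
  | nil => intro l2 hp _ _; exact (hp.symm.eq_nil).symm
  | cons a t ih =>
    intro l2 hp h1 h2
    match l2 with
    | [] => exact absurd hp.eq_nil (by simp)
    | b :: t2 =>
      by_cases hab : a = b
      · subst hab
        have := hp.cons_inv
        rw [ih t2 this (List.pairwise_cons.1 h1).2 (List.pairwise_cons.1 h2).2]
      · exfalso
        have hat2 : a ∈ t2 := by
          have : a ∈ b :: t2 := hp.mem_iff.1 (by simp)
          simpa [hab] using this
        have hbt : b ∈ t := by
          have : b ∈ a :: t := hp.symm.mem_iff.1 (by simp)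
          simpa [Ne.symm hab] using this
        exact hasym a b ((List.pairwise_cons.1 h1).1 b hbt) ((List.pairwise_cons.1 h2).1 a hat2)

-- ===== VERDICT (by name: the statement is the Claim_ definition above) =====
theorem GetDuplicates_spec : Claim_equal_GetDuplicates := by
  intro rosters _ hpre
  unfold Spec_GetDuplicates
  obtain ⟨hnd, hord⟩ := hpre
  -- both sides as key-lists with values
  rw [pvA_eq_foldE, pvB_eq_foldEB, pv_items_foldl_insert, pv_items_foldl_insert]
  have hKAeq : pvKA rosters = pvKB2 rosters := by
    -- permutation: same membership, both nodup
    have hperm : (pvKA rosters).Perm (pvKB2 rosters) := by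
      apply (List.perm_ext_iff_of_nodup (PySem.Set.nodup_ofList _) (PySem.Set.nodup_ofList _)).2
      intro c
      show c ∈ pvKA rosters ↔ c ∈ pvKB2 rosters
      rw [pv_mem_KA rosters hnd c, pv_mem_KB2 rosters hnd c]
    -- every key in either list occurs among the input's keys
    have hkeys : ∀ c, 2 ≤ (pvI rosters c).length →
        c ∈ rosters.flatMap (fun r => r.map Prod.fst) := by
      intro c h2
      have hne : pvI rosters c ≠ [] := by
        intro he; rw [he] at h2; simp at h2
      obtain ⟨i, hi⟩ := List.exists_mem_of_ne_nil _ hne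
      obtain ⟨h0, h1, hk⟩ := (pv_mem_I rosters c i).1 hi
      obtain ⟨q, hq, hqc⟩ := List.any_eq_true.1 hk
      apply List.mem_flatMap.2
      refine ⟨pvR rosters i, pv_roster_mem rosters i h0 h1, ?_⟩
      rw [show c = q.1 from by simpa using hqc]
      exact List.mem_map_of_mem hq
    -- under Pre_, the B-side order implies the A-side order on duplicate keys
    have hpwB : (pvKB2 rosters).Pairwise (fun a b => pvKey3 rosters a < pvKey3 rosters b) := by
      have hpwL := pv_KB2_pairwise rosters hnd
      apply List.Pairwise.imp_of_mem ?_ hpwL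
      intro a b ha hb hlt
      have h2a := (pv_mem_KB2 rosters hnd a).1 ha
      have h2b := (pv_mem_KB2 rosters hnd b).1 hb
      unfold pvKeyL at hlt
      rcases (List.cons_lt_cons_iff).1 hlt with h | ⟨he, hrest⟩
      · exact (List.cons_lt_cons_iff).2 (Or.inl h)
      · have hpos : pvPos rosters a (pvI1 rosters a) < pvPos rosters b (pvI1 rosters b) := by
          rcases (List.cons_lt_cons_iff).1 hrest with h | ⟨_, hf⟩
          · exact_mod_cast h
          · simp at hf
        have hi2 := hord a (hkeys a h2a) b (hkeys b h2b) h2a h2b he hpos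
        apply (List.cons_lt_cons_iff).2
        rcases lt_or_eq_of_le hi2 with h' | h'
        · exact Or.inr ⟨he, (List.cons_lt_cons_iff).2 (Or.inl h')⟩
        · exact Or.inr ⟨he, (List.cons_lt_cons_iff).2
            (Or.inr ⟨h', (List.cons_lt_cons_iff).2 (Or.inl (by exact_mod_cast hpos))⟩)⟩
    exact pv_perm_pairwise_eq _ (fun a b h1 h2 => absurd h2 (lt_asymm h1))
      (pvKA rosters) (pvKB2 rosters) hperm (pv_KA_pairwise rosters hnd) hpwB
  show (pvKA rosters).map _ = (pvKB2 rosters).map _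
  rw [← hKAeq]
  apply List.map_congr_left
  intro c hc
  have hd := (pv_mem_KA rosters hnd c).1 hc
  rw [pv_lastV rosters hnd c hd, pv_lastVB rosters hnd c hd]
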